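-- pv_equiv track=rewrite | github.com/choudoufu520/sky-autoplay | src/application/ai_arranger.py | _find_non_clashing_replacement
-- ===== SOURCE A (Python) =====
-- def _find_non_clashing_replacement(
--     original: int,
--     current: int,
--     available_sorted: list[int],
--     occupied: set[int],
-- ) -> int:
--     candidates = sorted(
--         available_sorted,
--         key=lambda candidate: (abs(candidate - current), abs(candidate - original), candidate),
--     )
--     for candidate in candidates:
--         if candidate in occupied:
--             continue
--         if any(abs(candidate - other) == 1 for other in occupied):
--             continue
--         return candidate
--     return current
-- ===== SOURCE B (Python) =====
-- def _find_non_clashing_replacement(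
--     original: int,
--     current: int,
--     available_sorted: list[int],
--     occupied: set[int],
-- ) -> int:
--     # Single linear pass: keep the best valid candidate by the key
--     # (distance to current, distance to original, value); no sort.
--     best_key = None
--     best = current
--     for c in available_sorted:
--         if c in occupied or (c - 1) in occupied or (c + 1) in occupied:
--             continue
--         k = (abs(c - current), abs(c - original), c)
--         if best_key is None or k < best_key:
--             best_key = k
--             best = c
--     return best
-- ===== Notes on version B (the rewrite author's own statement) =====
-- stated objective: faster
-- what changed: Replaces sort-the-whole-list-then-take-first-valid with a single linear pass keeping the candidate with the lexicographically smallest (|c-current|,|c-original|,c) key among non-clashing ones; adjacency is tested by two set lookups (c-1, c+1) instead of scanning all of occupied per candidate.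
import Mathlib
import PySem

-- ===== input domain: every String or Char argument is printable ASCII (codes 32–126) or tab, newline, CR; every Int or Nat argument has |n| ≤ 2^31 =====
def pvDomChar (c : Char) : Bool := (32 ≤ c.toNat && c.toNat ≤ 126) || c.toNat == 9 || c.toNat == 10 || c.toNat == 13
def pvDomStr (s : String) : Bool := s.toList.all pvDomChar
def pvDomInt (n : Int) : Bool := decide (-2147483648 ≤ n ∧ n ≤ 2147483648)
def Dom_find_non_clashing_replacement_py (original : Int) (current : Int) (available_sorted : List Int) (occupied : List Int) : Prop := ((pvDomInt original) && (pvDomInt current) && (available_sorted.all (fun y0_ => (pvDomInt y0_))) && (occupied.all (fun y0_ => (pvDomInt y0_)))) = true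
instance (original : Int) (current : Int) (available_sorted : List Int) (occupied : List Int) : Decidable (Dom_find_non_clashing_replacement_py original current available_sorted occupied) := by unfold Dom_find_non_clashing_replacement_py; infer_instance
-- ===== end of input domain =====

-- B replaces A's sort-then-scan with a single linear pass keeping the best valid
-- candidate by the key (|c-current|, |c-original|, c); objective: faster.

-- ===== PORT A =====
-- Python's tuple key comparison (abs(c-current), abs(c-original), c) '<', written out lexicographically
def pvALt (original : Int) (current : Int) (a : Int) (b : Int) : Bool :=
  decide (|a - current| < |b - current| ∨ (|a - current| = |b - current| ∧
    (|a - original| < |b - original| ∨ (|a - original| = |b - original| ∧ a < b))))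

-- A's for-loop over the sorted candidates: skip occupied / adjacent, return first hit, else current
def pvALoop (current : Int) (occupied : List Int) : List Int → Int
  | [] => current
  | c :: rest =>
    if occupied.contains c then pvALoop current occupied rest
    else if occupied.any (fun other => decide (|c - other| = 1)) then pvALoop current occupied rest
    else c

-- sorted(available_sorted, key=λc.(|c-current|,|c-original|,c)): Python's stable sort in its
-- insertion-sort form (PySem.List.sorted_eq_foldl_insertBy is this shape, rfl)
def find_non_clashing_replacement_py (original : Int) (current : Int) (available_sorted : List Int) (occupied : List Int) : Int :=
  pvALoop current occupied
    (available_sorted.foldl (fun acc x => PySem.List.insertBy (pvALt original current) x acc) [])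

-- ===== PORT B =====
-- Python tuple '<' on the 3-tuples, written out (lexicographic)
def pvBLexLt (a : Int × Int × Int) (b : Int × Int × Int) : Bool :=
  decide (a.1 < b.1 ∨ (a.1 = b.1 ∧ (a.2.1 < b.2.1 ∨ (a.2.1 = b.2.1 ∧ a.2.2 < b.2.2))))

-- one step of B's loop: skip clashing c, else keep the (key, value) with the smaller key
def pvBStep (original : Int) (current : Int) (occupied : List Int)
    (best : Option ((Int × Int × Int) × Int)) (c : Int) : Option ((Int × Int × Int) × Int) :=
  if occupied.contains c || occupied.contains (c - 1) || occupied.contains (c + 1) then best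
  else
    let k := (|c - current|, |c - original|, c)
    match best with
    | none => some (k, c)
    | some (bk, b) => if pvBLexLt k bk then some (k, c) else some (bk, b)

def find_non_clashing_replacement_py_alt (original : Int) (current : Int) (available_sorted : List Int) (occupied : List Int) : Int :=
  match available_sorted.foldl (pvBStep original current occupied) none with
  | none => current
  | some (_, c) => c

-- ===== PRECONDITION & SPEC =====
def Spec_find_non_clashing_replacement_py (original : Int) (current : Int) (available_sorted : List Int) (occupied : List Int) (out : Int) : Prop := out = find_non_clashing_replacement_py_alt original current available_sorted occupied
instance (original : Int) (current : Int) (available_sorted : List Int) (occupied : List Int) (out : Int) : Decidable (Spec_find_non_clashing_replacement_py original current available_sorted occupied out) := by unfold Spec_find_non_clashing_replacement_py; infer_instance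

-- ===== CLAIM (what is proved, stated in full; the proofs are below) =====
def Claim_equal_find_non_clashing_replacement_py : Prop := ∀ (original : Int) (current : Int) (available_sorted : List Int) (occupied : List Int), Dom_find_non_clashing_replacement_py original current available_sorted occupied → Spec_find_non_clashing_replacement_py original current available_sorted occupied (find_non_clashing_replacement_py original current available_sorted occupied)

-- ===== LEMMAS AND PROOFS =====

-- the sort key as a lexicographic triple (proof-side view of A's/B's comparisons)
def pvKeyA (original : Int) (current : Int) (c : Int) : Int ×ₗ Int ×ₗ Int :=
  toLex (|c - current|, toLex (|c - original|, c))

-- A's boolean comparison is the strict Lex order on pvKeyA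
lemma pvALt_iff (original current a b : Int) :
    pvALt original current a b = true ↔ pvKeyA original current a < pvKeyA original current b := by
  simp only [pvALt, decide_eq_true_eq, pvKeyA, Prod.Lex.lt_iff]
  simp

-- inserting with pvALt preserves key-sortedness
lemma pvInsert_pairwise (original current : Int) (x : Int) (ys : List Int)
    (h : ys.Pairwise (fun a b => pvKeyA original current a ≤ pvKeyA original current b)) :
    (PySem.List.insertBy (pvALt original current) x ys).Pairwise
      (fun a b => pvKeyA original current a ≤ pvKeyA original current b) := by
  induction ys with
  | nil => simp [PySem.List.insertBy]
  | cons y ys ih =>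
    rcases List.pairwise_cons.mp h with ⟨hy, hys⟩
    simp only [PySem.List.insertBy]
    by_cases hlt : pvALt original current x y = true
    · rw [if_pos hlt]
      refine List.pairwise_cons.mpr ⟨?_, h⟩
      intro z hz
      rcases List.mem_cons.mp hz with rfl | hz'
      · exact le_of_lt ((pvALt_iff original current x z).mp hlt)
      · exact le_trans (le_of_lt ((pvALt_iff original current x y).mp hlt)) (hy z hz')
    · rw [if_neg hlt]
      refine List.pairwise_cons.mpr ⟨?_, ih hys⟩
      intro z hz
      rcases (PySem.List.mem_insertBy _ _ _ _).mp hz with rfl | hz'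
      · exact not_lt.mp (fun hc => hlt ((pvALt_iff original current z y).mpr hc))
      · exact hy z hz'

-- the whole insertion fold is key-sorted
lemma pvInsFold_pairwise (original current : Int) (xs : List Int) (acc : List Int)
    (hacc : acc.Pairwise (fun a b => pvKeyA original current a ≤ pvKeyA original current b)) :
    (xs.foldl (fun a x => PySem.List.insertBy (pvALt original current) x a) acc).Pairwise
      (fun a b => pvKeyA original current a ≤ pvKeyA original current b) := by
  induction xs generalizing acc with
  | nil => exact hacc
  | cons x xs ih => exact ih _ (pvInsert_pairwise original current x acc hacc)

-- the insertion fold has exactly the elements of acc and xs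
lemma pvInsFold_mem (original current : Int) (xs : List Int) (acc : List Int) (z : Int) :
    z ∈ xs.foldl (fun a x => PySem.List.insertBy (pvALt original current) x a) acc
      ↔ z ∈ acc ∨ z ∈ xs := by
  induction xs generalizing acc with
  | nil => simp
  | cons x xs ih =>
    rw [List.foldl_cons, ih]
    simp only [PySem.List.mem_insertBy, List.mem_cons]
    tauto

-- the common validity predicate: c itself and its neighbours are free
def pvValid (occupied : List Int) (c : Int) : Bool :=
  !occupied.contains c && !occupied.contains (c - 1) && !occupied.contains (c + 1)

-- A's two skip tests together are exactly pvValid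
lemma pvA_test_eq (occupied : List Int) (c : Int) :
    (!occupied.contains c && !occupied.any (fun other => decide (|c - other| = 1)))
      = pvValid occupied c := by
  have h : occupied.any (fun other => decide (|c - other| = 1))
      = (occupied.contains (c - 1) || occupied.contains (c + 1)) := by
    rw [Bool.eq_iff_iff]
    simp only [List.any_eq_true, List.contains_eq_mem, Bool.or_eq_true, decide_eq_true_eq]
    constructor
    · rintro ⟨o, ho, h1⟩
      rcases (abs_eq (by norm_num : (0:Int) ≤ 1)).mp h1 with h | h
      · left; have heq : c - 1 = o := by omega
        rwa [heq]
      · right; have heq : c + 1 = o := by omega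
        rwa [heq]
    · rintro (h | h)
      · exact ⟨c - 1, h, by rw [show c - (c - 1) = 1 by ring]; exact abs_one⟩
      · exact ⟨c + 1, h, by rw [show c - (c + 1) = -1 by ring]; simp⟩
  simp [pvValid, h, Bool.and_assoc]

-- A's loop is find?-with-default over pvValid
lemma pvALoop_eq_find? (current : Int) (occupied : List Int) (s : List Int) :
    pvALoop current occupied s = (s.find? (pvValid occupied)).getD current := by
  induction s with
  | nil => rfl
  | cons c rest ih =>
    have ht := pvA_test_eq occupied c
    cases hv : pvValid occupied c with
    | true =>
      have hboth := ht.trans hv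
      simp only [Bool.and_eq_true, Bool.not_eq_true'] at hboth
      simp only [pvALoop, hboth.1, hboth.2]
      rw [if_neg (by simp), if_neg (by simp), List.find?_cons, hv]
      rfl
    | false =>
      rw [hv] at ht
      rw [List.find?_cons, hv]
      by_cases hc : occupied.contains c = true
      · simp only [pvALoop, hc]
        rw [if_pos trivial]
        exact ih
      · have hb : occupied.any (fun other => decide (|c - other| = 1)) = true := by
          rcases Bool.and_eq_false_iff.mp ht with h | h
          · simp only [Bool.not_eq_false'] at h; exact absurd h hc
          · simpa using h
        simp only [pvALoop, hb]
        rw [if_neg hc, if_pos trivial]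
        exact ih

-- bridge: B's boolean tuple-< is the Lex order of pvKeyA
lemma pvBLexLt_iff (original current a b : Int) :
    pvBLexLt (|a - current|, |a - original|, a) (|b - current|, |b - original|, b) = true
      ↔ pvKeyA original current a < pvKeyA original current b := by
  simp only [pvBLexLt, decide_eq_true_eq, pvKeyA, Prod.Lex.lt_iff]
  simp

-- pvKeyA is injective (third component is c itself)
lemma pvKeyA_inj (original current : Int) {a b : Int}
    (h : pvKeyA original current a = pvKeyA original current b) : a = b := by
  unfold pvKeyA at h
  have h1 := toLex.injective h
  have h2 := toLex.injective (congrArg Prod.snd h1)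
  exact congrArg Prod.snd h2

-- the first valid element of a key-sorted list has minimal key among valid elements
lemma find?_sorted_min (original current : Int) (occupied : List Int) (s : List Int)
    (hs : s.Pairwise (fun a b => pvKeyA original current a ≤ pvKeyA original current b))
    {r : Int} (hr : s.find? (pvValid occupied) = some r) :
    r ∈ s ∧ pvValid occupied r = true ∧
      ∀ x ∈ s, pvValid occupied x = true → pvKeyA original current r ≤ pvKeyA original current x := by
  induction s with
  | nil => simp at hr
  | cons c rest ih =>
    rcases List.pairwise_cons.mp hs with ⟨hc, hrest⟩
    rw [List.find?_cons] at hr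
    cases hv : pvValid occupied c with
    | true =>
      rw [hv] at hr
      injection hr with h
      subst h
      refine ⟨List.mem_cons_self, hv, ?_⟩
      intro x hx hvx
      rcases List.mem_cons.mp hx with rfl | hx'
      · exact le_refl _
      · exact hc x hx'
    | false =>
      rw [hv] at hr
      obtain ⟨hmem, hval, hmin⟩ := ih hrest hr
      refine ⟨List.mem_cons_of_mem _ hmem, hval, ?_⟩
      intro x hx hvx
      rcases List.mem_cons.mp hx with rfl | hx'
      · simp [hv] at hvx
      · exact hmin x hx' hvx

-- characterization of B's fold: the accumulator invariant
-- acc is either none (no valid seen) or some (key b, b) with b valid and key minimal so far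
def pvBInv (original current : Int) (occupied : List Int)
    (acc : Option ((Int × Int × Int) × Int)) : Prop :=
  ∀ k b, acc = some (k, b) → k = (|b - current|, |b - original|, b) ∧ pvValid occupied b = true

lemma pvB_fold_none (original current : Int) (occupied : List Int) (l : List Int)
    (acc : Option ((Int × Int × Int) × Int)) :
    l.foldl (pvBStep original current occupied) acc = none
      ↔ acc = none ∧ ∀ x ∈ l, pvValid occupied x = false := by
  induction l generalizing acc with
  | nil => simp
  | cons c rest ih =>
    simp only [List.foldl_cons, ih]
    unfold pvBStep
    by_cases hcl : (occupied.contains c || occupied.contains (c - 1) || occupied.contains (c + 1)) = true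
    · rw [if_pos hcl]
      have hv : pvValid occupied c = false := by
        simp only [Bool.or_eq_true] at hcl
        rcases hcl with (h | h) | h <;> simp at h <;> simp [pvValid, h]
      constructor
      · rintro ⟨h1, h2⟩
        exact ⟨h1, fun x hx => by
          rcases List.mem_cons.mp hx with rfl | hx'
          · exact hv
          · exact h2 x hx'⟩
      · rintro ⟨h1, h2⟩
        exact ⟨h1, fun x hx => h2 x (List.mem_cons_of_mem _ hx)⟩
    · rw [if_neg hcl]
      have hv : pvValid occupied c = true := by
        simp only [Bool.or_eq_true, not_or, List.contains_eq_mem, decide_eq_true_eq] at hcl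
        simp [pvValid, hcl.1.1, hcl.1.2, hcl.2]
      cases acc with
      | none =>
        constructor
        · rintro ⟨h, -⟩; simp at h
        · rintro ⟨-, h2⟩
          exact absurd (h2 c List.mem_cons_self) (by simp [hv])
      | some p =>
        rcases p with ⟨bk, b⟩
        constructor
        · rintro ⟨h, -⟩
          rcases Bool.eq_false_or_eq_true (pvBLexLt (|c - current|, |c - original|, c) bk) with
            hlt | hlt <;> simp [hlt] at h
        · rintro ⟨h, -⟩; simp at h

lemma pvB_fold_some (original current : Int) (occupied : List Int) (l : List Int)
    (acc : Option ((Int × Int × Int) × Int)) (hacc : pvBInv original current occupied acc)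
    {k : Int × Int × Int} {r : Int}
    (h : l.foldl (pvBStep original current occupied) acc = some (k, r)) :
    (k = (|r - current|, |r - original|, r) ∧ pvValid occupied r = true) ∧
    (∀ x ∈ l, pvValid occupied x = true →
        pvKeyA original current r ≤ pvKeyA original current x) ∧
    (∀ k0 b0, acc = some (k0, b0) → pvKeyA original current r ≤ pvKeyA original current b0) ∧
    (r ∈ l ∨ acc = some (k, r)) := by
  induction l generalizing acc with
  | nil =>
    simp only [List.foldl_nil] at h
    refine ⟨hacc _ _ h, by simp, ?_, Or.inr h⟩
    intro k0 b0 h0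
    rw [h0] at h
    injection h with h'
    have hb : b0 = r := congrArg Prod.snd h'
    rw [hb]
  | cons c rest ih =>
    simp only [List.foldl_cons] at h
    by_cases hcl : (occupied.contains c || occupied.contains (c - 1) || occupied.contains (c + 1)) = true
    · rw [show pvBStep original current occupied acc c = acc from by
        unfold pvBStep; rw [if_pos hcl]] at h
      have hvc : pvValid occupied c = false := by
        simp only [Bool.or_eq_true] at hcl
        rcases hcl with (h' | h') | h' <;> simp at h' <;> simp [pvValid, h']
      obtain ⟨hkr, hminrest, haccle, hmem⟩ := ih acc hacc h
      refine ⟨hkr, ?_, haccle, ?_⟩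
      · intro x hx hvx
        rcases List.mem_cons.mp hx with rfl | hx'
        · rw [hvc] at hvx; cases hvx
        · exact hminrest x hx' hvx
      · rcases hmem with hm | hm
        · exact Or.inl (List.mem_cons_of_mem _ hm)
        · exact Or.inr hm
    · have hvc : pvValid occupied c = true := by
        simp only [Bool.or_eq_true, not_or, List.contains_eq_mem, decide_eq_true_eq] at hcl
        simp [pvValid, hcl.1.1, hcl.1.2, hcl.2]
      cases acc with
      | none =>
        rw [show pvBStep original current occupied none c
              = some ((|c - current|, |c - original|, c), c) from by
            unfold pvBStep; rw [if_neg hcl]] at h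
        have hstep : pvBInv original current occupied
            (some ((|c - current|, |c - original|, c), c)) := by
          intro k' b' h'
          injection h' with h''
          cases h''
          exact ⟨rfl, hvc⟩
        obtain ⟨hkr, hminrest, haccle, hmem⟩ := ih _ hstep h
        refine ⟨hkr, ?_, ?_, ?_⟩
        · intro x hx hvx
          rcases List.mem_cons.mp hx with rfl | hx'
          · exact haccle _ _ rfl
          · exact hminrest x hx' hvx
        · intro k0 b0 h0; cases h0
        · rcases hmem with hm | hm
          · exact Or.inl (List.mem_cons_of_mem _ hm)
          · injection hm with hm'
            cases congrArg Prod.snd hm'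
            exact Or.inl List.mem_cons_self
      | some p =>
        rcases p with ⟨bk, b⟩
        obtain ⟨hbk, hvb⟩ := hacc bk b rfl
        by_cases hlt : pvBLexLt (|c - current|, |c - original|, c) bk = true
        · rw [show pvBStep original current occupied (some (bk, b)) c
                = some ((|c - current|, |c - original|, c), c) from by
              unfold pvBStep; rw [if_neg hcl]; simp [hlt]] at h
          have hstep : pvBInv original current occupied
              (some ((|c - current|, |c - original|, c), c)) := by
            intro k' b' h'
            injection h' with h''
            cases h''
            exact ⟨rfl, hvc⟩
          obtain ⟨hkr, hminrest, haccle, hmem⟩ := ih _ hstep h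
          refine ⟨hkr, ?_, ?_, ?_⟩
          · intro x hx hvx
            rcases List.mem_cons.mp hx with rfl | hx'
            · exact haccle _ _ rfl
            · exact hminrest x hx' hvx
          · intro k0 b0 h0
            injection h0 with h0'
            cases congrArg Prod.snd h0'
            have h1 := haccle _ _ rfl
            subst hbk
            rw [pvBLexLt_iff] at hlt
            exact le_trans h1 (le_of_lt hlt)
          · rcases hmem with hm | hm
            · exact Or.inl (List.mem_cons_of_mem _ hm)
            · injection hm with hm'
              cases congrArg Prod.snd hm'
              exact Or.inl List.mem_cons_self
        · rw [show pvBStep original current occupied (some (bk, b)) c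
                = some (bk, b) from by
              unfold pvBStep; rw [if_neg hcl]; simp [hlt]] at h
          obtain ⟨hkr, hminrest, haccle, hmem⟩ := ih _ hacc h
          refine ⟨hkr, ?_, haccle, ?_⟩
          · intro x hx hvx
            rcases List.mem_cons.mp hx with rfl | hx'
            · have h1 := haccle bk b rfl
              subst hbk
              rw [pvBLexLt_iff] at hlt
              exact le_trans h1 (not_lt.mp hlt)
            · exact hminrest x hx' hvx
          · rcases hmem with hm | hm
            · exact Or.inl (List.mem_cons_of_mem _ hm)
            · exact Or.inr hm

-- ===== VERDICT (by name: the statement is the Claim_ definition above) =====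
theorem find_non_clashing_replacement_py_spec : Claim_equal_find_non_clashing_replacement_py := by
  intro original current avail occ _
  unfold Spec_find_non_clashing_replacement_py
  unfold find_non_clashing_replacement_py find_non_clashing_replacement_py_alt
  rw [pvALoop_eq_find?]
  set s := avail.foldl (fun acc x => PySem.List.insertBy (pvALt original current) x acc) [] with hs
  have hmem : ∀ z, z ∈ s ↔ z ∈ avail := fun z => by
    rw [hs, pvInsFold_mem]; simp
  have hpair : s.Pairwise (fun a b => pvKeyA original current a ≤ pvKeyA original current b) := by
    rw [hs]; exact pvInsFold_pairwise original current avail [] (by simp)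
  cases hB : avail.foldl (pvBStep original current occ) none with
  | none =>
    have hnone := (pvB_fold_none original current occ avail none).mp hB
    have : s.find? (pvValid occ) = none := by
      rw [List.find?_eq_none]
      intro x hx
      simp [hnone.2 x ((hmem x).mp hx)]
    simp [this]
  | some p =>
    rcases p with ⟨k, rB⟩
    obtain ⟨⟨_, hvB⟩, hminB, _, hmemB⟩ :=
      pvB_fold_some original current occ avail none (by intro k b h; simp at h) hB
    have hmemB' : rB ∈ avail := hmemB.resolve_right (by simp)
    cases hA : s.find? (pvValid occ) with
    | none =>
      exfalso
      rw [List.find?_eq_none] at hA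
      exact absurd hvB (by simpa using hA rB ((hmem rB).mpr hmemB'))
    | some rA =>
      obtain ⟨hmemA, hvA, hminA⟩ := find?_sorted_min original current occ s hpair hA
      have h1 : pvKeyA original current rA ≤ pvKeyA original current rB :=
        hminA rB ((hmem rB).mpr hmemB') hvB
      have h2 : pvKeyA original current rB ≤ pvKeyA original current rA :=
        hminB rA ((hmem rA).mp hmemA) hvA
      have : rA = rB := pvKeyA_inj original current (le_antisymm h1 h2)
      simp [this]
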